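-- pv_equiv track=rewrite | github.com/RokPre/informacija-in-kodi | izbirna/my_qoi.py | decode_RGBA
-- ===== SOURCE A (Python) =====
-- def decode_RGBA(data, height, width):
--     output_list = [[[0, 0, 0, 0] for _ in range(width)] for _ in range(height)]
--     prev_pixel: list[int] = [0, 0, 0, 255]
--     running_list: list[list[int]] = [[0, 0, 0, 0] for _ in range(64)]
--
--     byte_index = 0
--     run_length = 0
--     for h in range(height):
--         for w in range(width):
--             # pixel = [blue, green, red]
--
--             # Run
--             if run_length > 0:
--                 run_length -= 1
--                 pixel = prev_pixel.copy()
--                 output_list[h][w] = pixel.copy()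
--
--                 color_hash = (pixel[2] * 3 + pixel[1] * 5 + pixel[0] * 7 + pixel[3] * 11) % 64
--                 running_list[color_hash] = pixel.copy()
--                 continue
--
--             # Unique
--             if data[byte_index] == 0b11111111:
--                 r = data[byte_index + 1]
--                 g = data[byte_index + 2]
--                 b = data[byte_index + 3]
--                 a = data[byte_index + 4]
--                 pixel = [b, g, r, a]
--                 output_list[h][w] = pixel.copy()
--
--                 color_hash = (pixel[2] * 3 + pixel[1] * 5 + pixel[0] * 7 + pixel[3] * 11) % 64
--                 running_list[color_hash] = pixel.copy()
--                 prev_pixel = pixel.copy()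
--                 byte_index = byte_index + 5
--                 continue
--
--             tag = data[byte_index] & 0b11000000
--             # Index
--             if tag == 0b00000000:
--                 pixel = running_list[data[byte_index] & 0b00111111]
--                 output_list[h][w] = pixel.copy()
--
--                 prev_pixel = pixel.copy()
--                 byte_index += 1
--                 continue
--
--             # Diff
--             if tag == 0b01000000:
--                 # pixel = [prev_pixel[i] + ((data[byte_index] >> (2 * i)) & 0b11) - 2 for i in range(0, 3)]
--                 r = prev_pixel[2] + ((data[byte_index] >> 4) & 0b11) - 2
--                 g = prev_pixel[1] + ((data[byte_index] >> 2) & 0b11) - 2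
--                 b = prev_pixel[0] + ((data[byte_index] >> 0) & 0b11) - 2
--                 a = prev_pixel[3]
--                 pixel = [b, g, r, a]
--                 output_list[h][w] = pixel.copy()
--
--                 color_hash = (pixel[2] * 3 + pixel[1] * 5 + pixel[0] * 7 + pixel[3] * 11) % 64
--                 running_list[color_hash] = pixel.copy()
--                 prev_pixel = pixel.copy()
--                 byte_index += 1
--                 continue
--
--             # Luma
--             if tag == 0b10000000:
--                 dg = (data[byte_index] & 0b00111111) - 32
--
--                 byte_index += 1
--
--                 drdg = ((data[byte_index] >> 4) & 0b00001111) - 8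
--                 dbdg = ((data[byte_index] >> 0) & 0b00001111) - 8
--                 dr = drdg + dg
--                 db = dbdg + dg
--
--                 a = prev_pixel[3]
--
--                 pixel = [(prev_pixel[0] + db) & 0xFF, (prev_pixel[1] + dg) & 0xFF, (prev_pixel[2] + dr) & 0xFF, a]
--                 output_list[h][w] = pixel.copy()
--
--                 color_hash = (pixel[2] * 3 + pixel[1] * 5 + pixel[0] * 7 + pixel[3] * 11) % 64
--                 running_list[color_hash] = pixel.copy()
--                 prev_pixel = pixel.copy()
--                 byte_index += 1
--                 continue
--
--             # RUN start
--             if tag == 0b11000000: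
--                 run_length = data[byte_index] & 0b00111111
--                 pixel = prev_pixel.copy()
--                 output_list[h][w] = pixel
--
--                 color_hash = (pixel[2] * 3 + pixel[1] * 5 + pixel[0] * 7 + pixel[3] * 11) % 64
--                 running_list[color_hash] = pixel.copy()
--                 prev_pixel = pixel.copy()
--                 byte_index += 1
--                 continue
--
--     return output_list
-- ===== SOURCE B (Python) =====
-- def decode_RGBA(data, height, width):
--     total = max(0, height) * max(0, width)
--     flat = []
--     prev = (0, 0, 0, 255)
--     running = [(0, 0, 0, 0)] * 64
--     bi = 0
--     while len(flat) < total: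
--         v = data[bi]
--         if v == 0xFF:
--             pixel = (data[bi + 3], data[bi + 2], data[bi + 1], data[bi + 4])
--             bi += 5
--         else:
--             tag = v & 0xC0
--             if tag == 0x00:
--                 # Index opcode: copy from the table, no table update
--                 pixel = running[v & 0x3F]
--                 flat.append(pixel)
--                 prev = pixel
--                 bi += 1
--                 continue
--             b0, g0, r0, a0 = prev
--             if tag == 0x40:
--                 pixel = (b0 + (v & 3) - 2,
--                          g0 + ((v >> 2) & 3) - 2,
--                          r0 + ((v >> 4) & 3) - 2,
--                          a0)
--                 bi += 1
--             elif tag == 0x80: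
--                 dg = (v & 0x3F) - 32
--                 w2 = data[bi + 1]
--                 pixel = ((b0 + ((w2 & 0xF) - 8) + dg) & 0xFF,
--                          (g0 + dg) & 0xFF,
--                          (r0 + (((w2 >> 4) & 0xF) - 8) + dg) & 0xFF,
--                          a0)
--                 bi += 2
--             else:
--                 # RUN: emit (v & 0x3F) + 1 copies of prev in bulk, capped at what is left
--                 n = min((v & 0x3F) + 1, total - len(flat))
--                 flat.extend([prev] * n)
--                 running[(r0 * 3 + g0 * 5 + b0 * 7 + a0 * 11) % 64] = prev
--                 bi += 1
--                 continue
--         flat.append(pixel)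
--         b1, g1, r1, a1 = pixel
--         running[(r1 * 3 + g1 * 5 + b1 * 7 + a1 * 11) % 64] = pixel
--         prev = pixel
--     return [[list(p) for p in flat[i * width:(i + 1) * width]] for i in range(height)]
-- ===== Notes on version B (the rewrite author's own statement) =====
-- stated objective: alternative
-- what changed: B decodes by a single pass over the byte stream -- pixels kept as 4-tuples, one opcode read per iteration, whole runs emitted in bulk with list.extend, stopping once height*width pixels exist -- then reshapes the flat pixel list into rows by slicing and listifying, instead of A's nested loops over every output cell of a pre-built grid with a run-length countdown carried across grid positions.
import Mathlib
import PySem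

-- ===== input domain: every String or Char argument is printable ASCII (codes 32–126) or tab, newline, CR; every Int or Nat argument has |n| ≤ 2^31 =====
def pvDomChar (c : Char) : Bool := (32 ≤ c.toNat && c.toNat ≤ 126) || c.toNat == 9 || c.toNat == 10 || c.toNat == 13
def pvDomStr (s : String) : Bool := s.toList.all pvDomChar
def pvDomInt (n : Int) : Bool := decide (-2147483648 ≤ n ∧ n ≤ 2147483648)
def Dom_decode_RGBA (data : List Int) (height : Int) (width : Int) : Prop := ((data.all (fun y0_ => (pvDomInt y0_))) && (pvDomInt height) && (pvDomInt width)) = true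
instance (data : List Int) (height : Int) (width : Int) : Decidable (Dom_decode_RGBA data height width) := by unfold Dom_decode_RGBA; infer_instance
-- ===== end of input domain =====

-- B decodes by a single pass over the byte stream (pixels as 4-tuples, runs emitted in bulk,
-- stopping at height*width pixels) and then reshapes/listifies, instead of A's nested loops over
-- output positions with a run countdown; objective: alternative decomposition, same cost.

-- ===== PORT A =====
-- loop body of A's inner `for w in range(width)` loop; state = (output_list, prev_pixel, running_list, byte_index, run_length)
def decode_RGBA_inner (data : List Int) (h : Int)
    (st : List (List (List Int)) × List Int × List (List Int) × Int × Int) (w : Int) :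
    List (List (List Int)) × List Int × List (List Int) × Int × Int :=
  match st with
  | (out, prev, run, bi, rl) =>
    -- Run
    if rl > 0 then
      let pixel := prev
      let out := PySem.List.pySetD out h (PySem.List.pySetD (PySem.List.pyGetD out h []) w pixel)
      let ch := PySem.Int.mod (PySem.List.pyGetD pixel 2 0 * 3 + PySem.List.pyGetD pixel 1 0 * 5 + PySem.List.pyGetD pixel 0 0 * 7 + PySem.List.pyGetD pixel 3 0 * 11) 64
      (out, prev, PySem.List.pySetD run ch pixel, bi, rl - 1)
    -- Unique
    else if PySem.List.pyGetD data bi 0 == 255 then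
      let r := PySem.List.pyGetD data (bi + 1) 0
      let g := PySem.List.pyGetD data (bi + 2) 0
      let b := PySem.List.pyGetD data (bi + 3) 0
      let a := PySem.List.pyGetD data (bi + 4) 0
      let pixel := [b, g, r, a]
      let out := PySem.List.pySetD out h (PySem.List.pySetD (PySem.List.pyGetD out h []) w pixel)
      let ch := PySem.Int.mod (PySem.List.pyGetD pixel 2 0 * 3 + PySem.List.pyGetD pixel 1 0 * 5 + PySem.List.pyGetD pixel 0 0 * 7 + PySem.List.pyGetD pixel 3 0 * 11) 64
      (out, pixel, PySem.List.pySetD run ch pixel, bi + 5, rl)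
    else
      let tag := PySem.Int.band (PySem.List.pyGetD data bi 0) 192
      -- Index
      if tag == 0 then
        let pixel := PySem.List.pyGetD run (PySem.Int.band (PySem.List.pyGetD data bi 0) 63) []
        let out := PySem.List.pySetD out h (PySem.List.pySetD (PySem.List.pyGetD out h []) w pixel)
        (out, pixel, run, bi + 1, rl)
      -- Diff
      else if tag == 64 then
        let r := PySem.List.pyGetD prev 2 0 + PySem.Int.band ((PySem.List.pyGetD data bi 0) >>> (4:Nat)) 3 - 2
        let g := PySem.List.pyGetD prev 1 0 + PySem.Int.band ((PySem.List.pyGetD data bi 0) >>> (2:Nat)) 3 - 2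
        let b := PySem.List.pyGetD prev 0 0 + PySem.Int.band ((PySem.List.pyGetD data bi 0) >>> (0:Nat)) 3 - 2
        let a := PySem.List.pyGetD prev 3 0
        let pixel := [b, g, r, a]
        let out := PySem.List.pySetD out h (PySem.List.pySetD (PySem.List.pyGetD out h []) w pixel)
        let ch := PySem.Int.mod (PySem.List.pyGetD pixel 2 0 * 3 + PySem.List.pyGetD pixel 1 0 * 5 + PySem.List.pyGetD pixel 0 0 * 7 + PySem.List.pyGetD pixel 3 0 * 11) 64
        (out, pixel, PySem.List.pySetD run ch pixel, bi + 1, rl)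
      -- Luma
      else if tag == 128 then
        let dg := PySem.Int.band (PySem.List.pyGetD data bi 0) 63 - 32
        let bi := bi + 1
        let drdg := PySem.Int.band ((PySem.List.pyGetD data bi 0) >>> (4:Nat)) 15 - 8
        let dbdg := PySem.Int.band ((PySem.List.pyGetD data bi 0) >>> (0:Nat)) 15 - 8
        let dr := drdg + dg
        let db := dbdg + dg
        let a := PySem.List.pyGetD prev 3 0
        let pixel := [PySem.Int.band (PySem.List.pyGetD prev 0 0 + db) 255, PySem.Int.band (PySem.List.pyGetD prev 1 0 + dg) 255, PySem.Int.band (PySem.List.pyGetD prev 2 0 + dr) 255, a]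
        let out := PySem.List.pySetD out h (PySem.List.pySetD (PySem.List.pyGetD out h []) w pixel)
        let ch := PySem.Int.mod (PySem.List.pyGetD pixel 2 0 * 3 + PySem.List.pyGetD pixel 1 0 * 5 + PySem.List.pyGetD pixel 0 0 * 7 + PySem.List.pyGetD pixel 3 0 * 11) 64
        (out, pixel, PySem.List.pySetD run ch pixel, bi + 1, rl)
      -- RUN start
      else if tag == 192 then
        let rl := PySem.Int.band (PySem.List.pyGetD data bi 0) 63
        let pixel := prev
        let out := PySem.List.pySetD out h (PySem.List.pySetD (PySem.List.pyGetD out h []) w pixel)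
        let ch := PySem.Int.mod (PySem.List.pyGetD pixel 2 0 * 3 + PySem.List.pyGetD pixel 1 0 * 5 + PySem.List.pyGetD pixel 0 0 * 7 + PySem.List.pyGetD pixel 3 0 * 11) 64
        (out, prev, PySem.List.pySetD run ch pixel, bi + 1, rl)
      else (out, prev, run, bi, rl)   -- Python falls through the if-chain (dead code: tag is always one of the four)

def decode_RGBA (data : List Int) (height : Int) (width : Int) : List (List (List Int)) :=
  let out := (PySem.List.pyRange 0 height 1).map (fun _ => (PySem.List.pyRange 0 width 1).map (fun _ => ([0, 0, 0, 0] : List Int)))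
  let prev : List Int := [0, 0, 0, 255]
  let run := (PySem.List.pyRange 0 64 1).map (fun _ => ([0, 0, 0, 0] : List Int))
  ((PySem.List.pyRange 0 height 1).foldl
      (fun st h => (PySem.List.pyRange 0 width 1).foldl (decode_RGBA_inner data h) st)
      (out, prev, run, 0, 0)).1

-- ===== PORT B =====
-- B keeps pixels as 4-tuples (b, g, r, a); python's `b1, g1, r1, a1 = pixel; (r1*3+g1*5+b1*7+a1*11) % 64`
def decode_RGBA_hash (p : Int × Int × Int × Int) : Int :=
  match p with
  | (b1, g1, r1, a1) => PySem.Int.mod (r1 * 3 + g1 * 5 + b1 * 7 + a1 * 11) 64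

-- python's `list(p)` at the final reshape
def decode_RGBA_listOf (p : Int × Int × Int × Int) : List Int :=
  match p with
  | (b1, g1, r1, a1) => [b1, g1, r1, a1]

-- Source B's `while len(flat) < total` loop; fuel = total - len(flat), the number of pixels still to emit
-- (each iteration emits at least one pixel, so the loop runs at most that often — the port is exact).
def decode_RGBA_emit (data : List Int) :
    Nat → (Int × Int × Int × Int) × List (Int × Int × Int × Int) × Int →
      List (Int × Int × Int × Int)
  | 0, _ => []
  | n + 1, (prev, running, bi) =>
    let v := PySem.List.pyGetD data bi 0
    if v == 255 then
      let pixel := (PySem.List.pyGetD data (bi + 3) 0, PySem.List.pyGetD data (bi + 2) 0,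
                    PySem.List.pyGetD data (bi + 1) 0, PySem.List.pyGetD data (bi + 4) 0)
      pixel :: decode_RGBA_emit data n
        (pixel, PySem.List.pySetD running (decode_RGBA_hash pixel) pixel, bi + 5)
    else if PySem.Int.band v 192 == 0 then
      let pixel := PySem.List.pyGetD running (PySem.Int.band v 63) (0, 0, 0, 0)
      pixel :: decode_RGBA_emit data n (pixel, running, bi + 1)
    else
      match prev with
      | (b0, g0, r0, a0) =>
        if PySem.Int.band v 192 == 64 then
          let pixel := (b0 + PySem.Int.band v 3 - 2,
                        g0 + PySem.Int.band (v >>> (2:Nat)) 3 - 2,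
                        r0 + PySem.Int.band (v >>> (4:Nat)) 3 - 2, a0)
          pixel :: decode_RGBA_emit data n
            (pixel, PySem.List.pySetD running (decode_RGBA_hash pixel) pixel, bi + 1)
        else if PySem.Int.band v 192 == 128 then
          let dg := PySem.Int.band v 63 - 32
          let w2 := PySem.List.pyGetD data (bi + 1) 0
          let pixel := (PySem.Int.band (b0 + (PySem.Int.band w2 15 - 8) + dg) 255,
                        PySem.Int.band (g0 + dg) 255,
                        PySem.Int.band (r0 + (PySem.Int.band (w2 >>> (4:Nat)) 15 - 8) + dg) 255, a0)
          pixel :: decode_RGBA_emit data n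
            (pixel, PySem.List.pySetD running (decode_RGBA_hash pixel) pixel, bi + 2)
        else
          let m := min ((PySem.Int.band v 63).toNat + 1) (n + 1)
          List.replicate m (b0, g0, r0, a0) ++
            decode_RGBA_emit data (n + 1 - m)
              ((b0, g0, r0, a0),
                PySem.List.pySetD running (decode_RGBA_hash (b0, g0, r0, a0)) (b0, g0, r0, a0),
                bi + 1)
  termination_by n _ => n
  decreasing_by
  · omega
  · omega
  · omega
  · omega
  · omega

def decode_RGBA_alt (data : List Int) (height : Int) (width : Int) : List (List (List Int)) :=
  let total := max 0 height * max 0 width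
  let flat := decode_RGBA_emit data total.toNat ((0, 0, 0, 255), List.replicate 64 (0, 0, 0, 0), 0)
  (PySem.List.pyRange 0 height 1).map (fun i =>
    (PySem.List.slice flat (some (i * width)) (some ((i + 1) * width))).map decode_RGBA_listOf)

-- ===== PRECONDITION & SPEC =====
-- pvOk data need bi rl says: with `rl` run repeats pending at byte bi, the stream supplies `need`
-- more pixels without any read past the end of `data` — a well-formedness scan of the QOI stream
-- that tracks only the byte position, a pixel count and the pending run length (no pixel values,
-- no running table): it is exactly the condition under which A returns (else A raises IndexError).
def pvOk (data : List Int) : Nat → Int → Nat → Bool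
  | 0, _, _ => true
  | need + 1, bi, rl =>
    if rl > 0 then
      pvOk data need bi (rl - 1)
    else
      match PySem.List.pyGet? data bi with
      | none => false
      | some v =>
        if v == 255 then
          decide ((bi + 5 : Int) ≤ (data.length : Int)) && pvOk data need (bi + 5) 0
        else if PySem.Int.band v 192 == 128 then
          decide ((bi + 2 : Int) ≤ (data.length : Int)) && pvOk data need (bi + 2) 0
        else if PySem.Int.band v 192 == 192 then
          pvOk data need (bi + 1) (PySem.Int.band v 63).toNat
        else
          pvOk data need (bi + 1) 0

-- Pre_ excludes exactly the inputs on which A raises IndexError: the stream must be well-formed —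
-- every opcode byte A reads (with its operand bytes) lies inside `data` until height*width pixels
-- are produced.  On every input satisfying Pre_ the Python A returns normally.
def Pre_decode_RGBA (data : List Int) (height : Int) (width : Int) : Prop :=
  pvOk data (max 0 height * max 0 width).toNat 0 0 = true
instance (data : List Int) (height : Int) (width : Int) : Decidable (Pre_decode_RGBA data height width) := by
  unfold Pre_decode_RGBA; infer_instance

def pvWitness_decode_RGBA : List Int × Int × Int := ([255, 1, 2, 3, 4], 1, 1)

def Spec_decode_RGBA (data : List Int) (height : Int) (width : Int) (out : List (List (List Int))) : Prop := out = decode_RGBA_alt data height width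
instance (data : List Int) (height : Int) (width : Int) (out : List (List (List Int))) : Decidable (Spec_decode_RGBA data height width out) := by unfold Spec_decode_RGBA; infer_instance

-- ===== CLAIM (what is proved, stated in full; the proofs are below) =====
def Claim_equal_decode_RGBA : Prop := ∀ (data : List Int) (height : Int) (width : Int), Dom_decode_RGBA data height width → Pre_decode_RGBA data height width → Spec_decode_RGBA data height width (decode_RGBA data height width)

-- ===== LEMMAS AND PROOFS =====

-- pixel tuple → pixel list, the bridge between B's representation and A's
def pvToL (p : Int × Int × Int × Int) : List Int := decode_RGBA_listOf p

-- the per-pixel step of A, without the output grid: state = (prev, running, byte_index, run_length)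
def pvStep (data : List Int) (s : List Int × List (List Int) × Int × Int) :
    List Int × (List Int × List (List Int) × Int × Int) :=
  match s with
  | (prev, run, bi, rl) =>
    if rl > 0 then
      let ch := PySem.Int.mod (PySem.List.pyGetD prev 2 0 * 3 + PySem.List.pyGetD prev 1 0 * 5 + PySem.List.pyGetD prev 0 0 * 7 + PySem.List.pyGetD prev 3 0 * 11) 64
      (prev, (prev, PySem.List.pySetD run ch prev, bi, rl - 1))
    else if PySem.List.pyGetD data bi 0 == 255 then
      let pixel := [PySem.List.pyGetD data (bi + 3) 0, PySem.List.pyGetD data (bi + 2) 0, PySem.List.pyGetD data (bi + 1) 0, PySem.List.pyGetD data (bi + 4) 0]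
      let ch := PySem.Int.mod (PySem.List.pyGetD pixel 2 0 * 3 + PySem.List.pyGetD pixel 1 0 * 5 + PySem.List.pyGetD pixel 0 0 * 7 + PySem.List.pyGetD pixel 3 0 * 11) 64
      (pixel, (pixel, PySem.List.pySetD run ch pixel, bi + 5, rl))
    else
      let tag := PySem.Int.band (PySem.List.pyGetD data bi 0) 192
      if tag == 0 then
        let pixel := PySem.List.pyGetD run (PySem.Int.band (PySem.List.pyGetD data bi 0) 63) []
        (pixel, (pixel, run, bi + 1, rl))
      else if tag == 64 then
        let pixel := [PySem.List.pyGetD prev 0 0 + PySem.Int.band ((PySem.List.pyGetD data bi 0) >>> (0:Nat)) 3 - 2, PySem.List.pyGetD prev 1 0 + PySem.Int.band ((PySem.List.pyGetD data bi 0) >>> (2:Nat)) 3 - 2, PySem.List.pyGetD prev 2 0 + PySem.Int.band ((PySem.List.pyGetD data bi 0) >>> (4:Nat)) 3 - 2, PySem.List.pyGetD prev 3 0]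
        let ch := PySem.Int.mod (PySem.List.pyGetD pixel 2 0 * 3 + PySem.List.pyGetD pixel 1 0 * 5 + PySem.List.pyGetD pixel 0 0 * 7 + PySem.List.pyGetD pixel 3 0 * 11) 64
        (pixel, (pixel, PySem.List.pySetD run ch pixel, bi + 1, rl))
      else if tag == 128 then
        let dg := PySem.Int.band (PySem.List.pyGetD data bi 0) 63 - 32
        let drdg := PySem.Int.band ((PySem.List.pyGetD data (bi + 1) 0) >>> (4:Nat)) 15 - 8
        let dbdg := PySem.Int.band ((PySem.List.pyGetD data (bi + 1) 0) >>> (0:Nat)) 15 - 8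
        let pixel := [PySem.Int.band (PySem.List.pyGetD prev 0 0 + (dbdg + dg)) 255, PySem.Int.band (PySem.List.pyGetD prev 1 0 + dg) 255, PySem.Int.band (PySem.List.pyGetD prev 2 0 + (drdg + dg)) 255, PySem.List.pyGetD prev 3 0]
        let ch := PySem.Int.mod (PySem.List.pyGetD pixel 2 0 * 3 + PySem.List.pyGetD pixel 1 0 * 5 + PySem.List.pyGetD pixel 0 0 * 7 + PySem.List.pyGetD pixel 3 0 * 11) 64
        (pixel, (pixel, PySem.List.pySetD run ch pixel, bi + 1 + 1, rl))
      else
        let ch := PySem.Int.mod (PySem.List.pyGetD prev 2 0 * 3 + PySem.List.pyGetD prev 1 0 * 5 + PySem.List.pyGetD prev 0 0 * 7 + PySem.List.pyGetD prev 3 0 * 11) 64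
        (prev, (prev, PySem.List.pySetD run ch prev, bi + 1, PySem.Int.band (PySem.List.pyGetD data bi 0) 63))

-- iterate pvStep n times, collecting the emitted pixels
def pvIter (data : List Int) : Nat → (List Int × List (List Int) × Int × Int) →
    List (List Int) × (List Int × List (List Int) × Int × Int)
  | 0, s => ([], s)
  | n + 1, s =>
    let p := pvStep data s
    let q := pvIter data n p.2
    (p.1 :: q.1, q.2)

-- write ps into row starting at index i
def pvWrite (row : List (List Int)) (i : Nat) (ps : List (List Int)) : List (List Int) :=
  match ps with
  | [] => row
  | p :: ps => pvWrite (row.set i p) (i + 1) ps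

lemma pvAnd192 (n : Nat) : n &&& 192 = 0 ∨ n &&& 192 = 64 ∨ n &&& 192 = 128 ∨ n &&& 192 = 192 := by
  have h : (192 : Nat) = 64 ||| 128 := by decide
  rw [h, Nat.and_or_distrib_left]
  rw [show (64:Nat) = 2^6 by norm_num, show (128:Nat) = 2^7 by norm_num, Nat.and_two_pow, Nat.and_two_pow]
  cases n.testBit 6 <;> cases n.testBit 7 <;> simp

lemma pvBand192 (v : Int) : PySem.Int.band v 192 = 0 ∨ PySem.Int.band v 192 = 64 ∨ PySem.Int.band v 192 = 128 ∨ PySem.Int.band v 192 = 192 := by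
  unfold PySem.Int.band
  by_cases hv : 0 ≤ v
  · simp only [hv, if_true, if_pos (by norm_num : (0:Int) ≤ 192)]
    rcases pvAnd192 v.toNat with h | h | h | h <;> simp [h]
  · simp only [hv, if_false, if_pos (by norm_num : (0:Int) ≤ 192)]
    have h2 : (192:Int).toNat = 192 := by decide
    rcases pvAnd192 ((-v - 1).toNat) with h | h | h | h <;>
      rw [Nat.and_comm] at h <;> rw [h2, h] <;> omega

lemma pvBand63 (v : Int) : 0 ≤ PySem.Int.band v 63 ∧ PySem.Int.band v 63 < 64 := by
  unfold PySem.Int.band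
  by_cases hv : 0 ≤ v
  · simp only [hv, if_true, if_pos (by norm_num : (0:Int) ≤ 63)]
    have h := Nat.and_le_right (n := v.toNat) (m := 63)
    constructor
    · positivity
    · exact_mod_cast Nat.lt_succ_of_le h
  · simp only [hv, if_false, if_pos (by norm_num : (0:Int) ≤ 63)]
    have h2 : (63:Int).toNat = 63 := by decide
    have h := Nat.and_le_left (n := 63) (m := ((-v - 1).toNat))
    rw [h2]
    omega

lemma pvInner_eq (data : List Int) (h w : Int) (out : List (List (List Int)))
    (s : List Int × List (List Int) × Int × Int) :
    decode_RGBA_inner data h (out, s) w =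
      (PySem.List.pySetD out h (PySem.List.pySetD (PySem.List.pyGetD out h []) w (pvStep data s).1), (pvStep data s).2) := by
  obtain ⟨prev, run, bi, rl⟩ := s
  unfold decode_RGBA_inner pvStep
  dsimp only
  split_ifs <;> try rfl
  all_goals
    simp only [beq_iff_eq] at *
    exfalso
    rcases pvBand192 (PySem.List.pyGetD data bi 0) with h | h | h | h <;> exact absurd h (by assumption)

lemma pvIter_add (data : List Int) (a b : Nat) (s : List Int × List (List Int) × Int × Int) :
    pvIter data (a + b) s =
      ((pvIter data a s).1 ++ (pvIter data b (pvIter data a s).2).1, (pvIter data b (pvIter data a s).2).2) := by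
  induction a generalizing s with
  | zero => simp [pvIter]
  | succ a ih => rw [Nat.succ_add]; simp [pvIter, ih]

lemma pvIter_length (data : List Int) (n : Nat) (s : List Int × List (List Int) × Int × Int) :
    (pvIter data n s).1.length = n := by
  induction n generalizing s with
  | zero => rfl
  | succ n ih => simp [pvIter, ih]

lemma pvSetD_idem {α : Type} (r : List α) (c : Int) (hc : 0 ≤ c) (p : α) :
    PySem.List.pySetD (PySem.List.pySetD r c p) c p = PySem.List.pySetD r c p := by
  simp only [PySem.List.pySetD_of_nonneg _ _ hc, List.set_set]

-- run unrolling: with rl pending repeats and prev already written to its running_list slot,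
-- pvIter first emits min rl n copies of prev
lemma pvIter_run (data : List Int) (n : Nat) : ∀ (rl : Nat) (prev : List Int) (run : List (List Int)) (bi : Int),
    (hrun : PySem.List.pySetD run (PySem.Int.mod (PySem.List.pyGetD prev 2 0 * 3 + PySem.List.pyGetD prev 1 0 * 5 + PySem.List.pyGetD prev 0 0 * 7 + PySem.List.pyGetD prev 3 0 * 11) 64) prev = run) →
    (pvIter data n (prev, run, bi, (rl : Int))).1 =
      List.replicate (min rl n) prev ++ (pvIter data (n - min rl n) (prev, run, bi, 0)).1 := by
  induction n with
  | zero => intro rl prev run bi _; simp [pvIter]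
  | succ n ih =>
    intro rl prev run bi hrun
    cases rl with
    | zero => norm_num
    | succ r =>
      have h1 : ((r + 1 : Nat) : Int) > 0 := by exact_mod_cast Nat.succ_pos r
      simp only [pvIter, pvStep]
      rw [if_pos h1, hrun]
      have h2 : ((r + 1 : Nat) : Int) - 1 = (r : Int) := by push_cast; ring
      rw [h2, ih r prev run bi hrun]
      rw [Nat.succ_min_succ, List.replicate_succ, List.cons_append]
      have h3 : n + 1 - (min r n + 1) = n - min r n := by omega
      rw [h3]

-- B's stream loop produces (via pvToL) exactly the pixels of A's per-position stepping
lemma pvEmit_eq_iter (data : List Int) (n : Nat) :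
    ∀ (prev : Int × Int × Int × Int) (running : List (Int × Int × Int × Int)) (bi : Int),
    running.length = 64 →
    (decode_RGBA_emit data n (prev, running, bi)).map pvToL
      = (pvIter data n (pvToL prev, running.map pvToL, bi, 0)).1 := by
  induction n using Nat.strong_induction_on with
  | _ n ih =>
  intro prev running bi hlen
  match n with
  | 0 => simp [decode_RGBA_emit, pvIter]
  | Nat.succ m =>
    obtain ⟨b0, g0, r0, a0⟩ := prev
    have hms : ∀ (rn : List (Int × Int × Int × Int)) (x b g r a : Int),
        PySem.List.pySetD (rn.map pvToL) (PySem.Int.mod x 64) [b, g, r, a]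
          = (PySem.List.pySetD rn (PySem.Int.mod x 64) (b, g, r, a)).map pvToL := by
      intro rn x b g r a
      rw [PySem.List.pySetD_of_nonneg _ _ (PySem.Int.mod_nonneg _ (by norm_num)),
          PySem.List.pySetD_of_nonneg _ _ (PySem.Int.mod_nonneg _ (by norm_num)),
          List.map_set]
      rfl
    have hmsT : ∀ (rn : List (Int × Int × Int × Int)) (x : Int) (p : Int × Int × Int × Int),
        PySem.List.pySetD (rn.map pvToL) (PySem.Int.mod x 64) (pvToL p)
          = (PySem.List.pySetD rn (PySem.Int.mod x 64) p).map pvToL := by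
      intro rn x p
      rw [PySem.List.pySetD_of_nonneg _ _ (PySem.Int.mod_nonneg _ (by norm_num)),
          PySem.List.pySetD_of_nonneg _ _ (PySem.Int.mod_nonneg _ (by norm_num)),
          List.map_set]
    rw [decode_RGBA_emit]
    conv_rhs => rw [pvIter]
    simp only [pvStep]
    rw [if_neg (by omega : ¬ ((0:Int) > 0))]
    split_ifs with hv ht0 ht1 ht2
    · -- Unique
      rw [List.map_cons, ih m (by omega) _ _ _ (by rw [PySem.List.length_pySetD]; exact hlen), hms]
      rfl
    · -- Index
      obtain ⟨hi0, hi1⟩ := pvBand63 (PySem.List.pyGetD data bi 0)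
      rw [List.map_cons, ih m (by omega) _ _ _ hlen]
      have hget : PySem.List.pyGetD (running.map pvToL) (PySem.Int.band (PySem.List.pyGetD data bi 0) 63) []
          = pvToL (PySem.List.pyGetD running (PySem.Int.band (PySem.List.pyGetD data bi 0) 63) (0, 0, 0, 0)) := by
        rw [PySem.List.pyGetD_eq_getElem _ [] hi0 (by rw [List.length_map, hlen]; omega),
            PySem.List.pyGetD_eq_getElem _ (0, 0, 0, 0) hi0 (by rw [hlen]; omega)]
        simp
      rw [hget]
    · -- Diff
      rw [List.map_cons, ih m (by omega) _ _ _ (by rw [PySem.List.length_pySetD]; exact hlen), hms]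
      simp only [Int.shiftRight_zero]
      rfl
    · -- Luma
      rw [List.map_cons, ih m (by omega) _ _ _ (by rw [PySem.List.length_pySetD]; exact hlen), hms]
      simp only [decode_RGBA_hash, Int.shiftRight_zero, add_assoc]
      rfl
    · -- RUN
      have hk : 0 ≤ PySem.Int.band (PySem.List.pyGetD data bi 0) 63 := (pvBand63 _).1
      have hcast : ((PySem.Int.band (PySem.List.pyGetD data bi 0) 63).toNat : Int) = PySem.Int.band (PySem.List.pyGetD data bi 0) 63 :=
        Int.toNat_of_nonneg hk
      conv_rhs => rw [show PySem.Int.band (PySem.List.pyGetD data bi 0) 63 = ((PySem.Int.band (PySem.List.pyGetD data bi 0) 63).toNat : Int) from hcast.symm]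
      rw [List.map_append, List.map_replicate,
          ih (m + 1 - min ((PySem.Int.band (PySem.List.pyGetD data bi 0) 63).toNat + 1) (m + 1))
            (by omega) _ _ _ (by rw [PySem.List.length_pySetD]; exact hlen)]
      conv_rhs => rw [hmsT]
      rw [pvIter_run data m _ _ _ (bi + 1)
        (by rw [hmsT]
            exact congrArg (List.map pvToL) (pvSetD_idem _ _ (PySem.Int.mod_nonneg _ (by norm_num)) _))]
      have hmin : min ((PySem.Int.band (PySem.List.pyGetD data bi 0) 63).toNat + 1) (m + 1)
          = min ((PySem.Int.band (PySem.List.pyGetD data bi 0) 63).toNat) m + 1 := by omega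
      have hsub : m + 1 - (min ((PySem.Int.band (PySem.List.pyGetD data bi 0) 63).toNat) m + 1)
          = m - min ((PySem.Int.band (PySem.List.pyGetD data bi 0) 63).toNat) m := by omega
      rw [hmin, hsub]
      simp only [List.replicate_succ, List.cons_append]
      rfl

lemma pvWrite_snoc (row : List (List Int)) (i : Nat) (ps : List (List Int)) (p : List Int) :
    pvWrite row i (ps ++ [p]) = (pvWrite row i ps).set (i + ps.length) p := by
  induction ps generalizing row i with
  | nil => simp [pvWrite]
  | cons q ps ih =>
    simp only [List.cons_append, pvWrite, ih, List.length_cons]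
    congr 1
    omega

lemma pvWrite_aux (ps : List (List Int)) : ∀ (i : Nat) (row : List (List Int)),
    row.length = i + ps.length → pvWrite row i ps = row.take i ++ ps := by
  induction ps with
  | nil =>
    intro i row h
    simp only [List.length_nil, Nat.add_zero] at h
    simp [pvWrite, List.take_of_length_le (Nat.le_of_eq h)]
  | cons p ps ih =>
    intro i row h
    have hi : i < row.length := by simp only [List.length_cons] at h; omega
    rw [pvWrite, ih (i + 1) _ (by simp only [List.length_set, List.length_cons] at h ⊢; omega)]
    rw [List.set_eq_take_cons_drop p hi]
    have h1 : (row.take i).length = i := by rw [List.length_take]; omega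
    rw [show i + 1 = (row.take i).length + 1 from by omega, List.take_length_add_append]
    simp

lemma pvWrite_full (row ps : List (List Int)) (hl : row.length = ps.length) :
    pvWrite row 0 ps = ps := by
  simpa using pvWrite_aux ps 0 row (by omega)

-- A's inner loop over `w` fills row j of the grid with the next n pixels of the stream
lemma pvRow (data : List Int) (j : Nat) (n : Nat) :
    ∀ (grid : List (List (List Int))) (s : List Int × List (List Int) × Int × Int),
    j < grid.length →
    (PySem.List.pyRange 0 (n : Int) 1).foldl (decode_RGBA_inner data (j : Int)) (grid, s)
      = (grid.set j (pvWrite (grid.getD j []) 0 (pvIter data n s).1), (pvIter data n s).2) := by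
  induction n with
  | zero =>
    intro grid s hj
    rw [PySem.List.pyRange_one_eq_nil (by norm_num)]
    simp [pvIter, pvWrite, List.getD_eq_getElem?_getD, List.getElem?_eq_getElem hj,
      List.set_getElem_self]
  | succ n ih =>
    intro grid s hj
    rw [show ((n + 1 : Nat) : Int) = (n : Int) + 1 from by push_cast; ring,
      PySem.List.pyRange_one_succ_right (by positivity), List.foldl_append, ih grid s hj,
      List.foldl_cons, List.foldl_nil, pvInner_eq]
    have hps : (pvIter data (n + 1) s).1 = (pvIter data n s).1 ++ [(pvStep data (pvIter data n s).2).1] := by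
      rw [pvIter_add data n 1 s]; simp [pvIter]
    have hst : (pvIter data (n + 1) s).2 = (pvStep data (pvIter data n s).2).2 := by
      rw [pvIter_add data n 1 s]; simp [pvIter]
    rw [hps, hst, pvWrite_snoc, pvIter_length]
    simp only [PySem.List.pySetD_natCast, PySem.List.pyGetD_natCast, List.set_set, Nat.zero_add]
    congr 1
    congr 1
    simp [List.getD_eq_getElem?_getD, hj]

-- A's outer loop: after j rows, rows 0..j-1 hold the decoded pixels, the rest are untouched zeros
lemma pvOuter (data : List Int) (W H : Nat) (s0 : List Int × List (List Int) × Int × Int) :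
    ∀ (j : Nat), j ≤ H →
    (PySem.List.pyRange 0 (j : Int) 1).foldl
        (fun st h => (PySem.List.pyRange 0 (W : Int) 1).foldl (decode_RGBA_inner data h) st)
        (List.replicate H (List.replicate W ([0, 0, 0, 0] : List Int)), s0)
      = ((List.range j).map (fun i => (pvIter data W (pvIter data (i * W) s0).2).1)
            ++ List.replicate (H - j) (List.replicate W ([0, 0, 0, 0] : List Int)),
          (pvIter data (j * W) s0).2) := by
  intro j
  induction j with
  | zero =>
    intro _
    have h0 : PySem.List.pyRange 0 ((0 : Nat) : Int) 1 = [] :=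
      PySem.List.pyRange_one_eq_nil (by norm_num)
    rw [h0]
    simp only [List.foldl_nil, List.range_zero, List.map_nil, List.nil_append, Nat.sub_zero,
      Nat.zero_mul, pvIter]
  | succ j ih =>
    intro hj
    rw [show ((j + 1 : Nat) : Int) = (j : Int) + 1 from by push_cast; ring,
      PySem.List.pyRange_one_succ_right (by positivity), List.foldl_append, ih (by omega),
      List.foldl_cons, List.foldl_nil]
    have hmaplen : ((List.range j).map (fun i => (pvIter data W (pvIter data (i * W) s0).2).1)).length = j := by simp
    have hlen : ((List.range j).map (fun i => (pvIter data W (pvIter data (i * W) s0).2).1)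
        ++ List.replicate (H - j) (List.replicate W ([0, 0, 0, 0] : List Int))).length = H := by
      simp; omega
    rw [pvRow data j W _ _ (by rw [hlen]; omega)]
    have hget : (((List.range j).map (fun i => (pvIter data W (pvIter data (i * W) s0).2).1)
        ++ List.replicate (H - j) (List.replicate W ([0, 0, 0, 0] : List Int))).getD j [])
        = List.replicate W ([0, 0, 0, 0] : List Int) := by
      rw [List.getD_eq_getElem?_getD, List.getElem?_append_right (by omega), hmaplen]
      simp [show 0 < H - j from by omega]
    rw [hget, pvWrite_full _ _ (by simp [pvIter_length]), List.set_append]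
    rw [if_neg (by omega)]
    rw [hmaplen, show j - j = 0 from by omega,
      show H - j = (H - (j + 1)) + 1 from by omega, List.replicate_succ, List.set_cons_zero]
    rw [Prod.mk.injEq]
    constructor
    · rw [List.range_succ, List.map_append, List.map_singleton, List.append_assoc,
        List.singleton_append]
    · rw [Nat.succ_mul, pvIter_add]

lemma pvRange_toNat (a : Int) :
    PySem.List.pyRange 0 a 1 = PySem.List.pyRange 0 ((a.toNat : Nat) : Int) 1 := by
  rw [PySem.List.pyRange_one, PySem.List.pyRange_one]
  congr 2
  omega

-- ===== VERDICT (by name: the statement is the Claim_ definition above) =====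
theorem decode_RGBA_spec : Claim_equal_decode_RGBA := by
  intro data height width _ _
  unfold Spec_decode_RGBA decode_RGBA decode_RGBA_alt
  dsimp only
  by_cases hw : 0 ≤ width
  · -- width ≥ 0
    have hwc : ((width.toNat : Nat) : Int) = width := Int.toNat_of_nonneg hw
    have hg0 : (PySem.List.pyRange 0 height 1).map (fun _ => (PySem.List.pyRange 0 width 1).map (fun _ => ([0,0,0,0] : List Int)))
        = List.replicate height.toNat (List.replicate width.toNat ([0,0,0,0] : List Int)) := by
      rw [List.map_const', List.map_const', PySem.List.length_pyRange_one, PySem.List.length_pyRange_one]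
      norm_num
    rw [hg0, pvRange_toNat height, pvRange_toNat width]
    rw [pvOuter data width.toNat height.toNat ([0,0,0,255], (PySem.List.pyRange 0 64 1).map (fun _ => ([0,0,0,0] : List Int)), 0, 0) height.toNat (le_refl _)]
    have htot : (max 0 height * max 0 width).toNat = height.toNat * width.toNat := by
      rw [show max 0 height = ((height.toNat : Nat) : Int) from by omega,
        show max 0 width = ((width.toNat : Nat) : Int) from by omega, ← Nat.cast_mul]
      exact Int.toNat_natCast _
    have hrunmap : (List.replicate 64 ((0, 0, 0, 0) : Int × Int × Int × Int)).map pvToL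
        = (PySem.List.pyRange 0 64 1).map (fun _ => ([0,0,0,0] : List Int)) := by
      rw [List.map_replicate, List.map_const', PySem.List.length_pyRange_one]
      rfl
    have hflat : (decode_RGBA_emit data (max 0 height * max 0 width).toNat ((0, 0, 0, 255), List.replicate 64 (0, 0, 0, 0), 0)).map pvToL
        = (pvIter data (height.toNat * width.toNat) ([0,0,0,255], (PySem.List.pyRange 0 64 1).map (fun _ => ([0,0,0,0] : List Int)), 0, 0)).1 := by
      rw [htot, pvEmit_eq_iter data _ _ _ _ (by simp), hrunmap]
      rfl
    have hr : PySem.List.pyRange 0 ((height.toNat : Nat) : Int) 1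
        = List.map (fun (k : Nat) => (k : Int)) (List.range height.toNat) := by
      rw [PySem.List.pyRange_one]
      simp only [sub_zero, Int.toNat_natCast, zero_add]
    simp only [Nat.sub_self, List.replicate_zero, List.append_nil]
    rw [hr, List.map_map]
    apply List.map_congr_left
    intro k hk
    have hk' : k < height.toNat := List.mem_range.mp hk
    simp only [Function.comp_apply]
    have hb1 : ((k : Int)) * width = (((k * width.toNat : Nat)) : Int) := by
      push_cast
      rw [hwc]
    have hb2 : ((k : Int) + 1) * width = (((k * width.toNat : Nat)) : Int) + ((width.toNat : Nat) : Int) := by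
      push_cast
      rw [hwc]
      ring
    rw [hb1, hb2, PySem.List.slice_natCast_add]
    rw [show (decode_RGBA_listOf : Int × Int × Int × Int → List Int) = pvToL from rfl]
    rw [List.map_take, List.map_drop, hflat]
    have hsplit : height.toNat * width.toNat = k * width.toNat + (width.toNat + (height.toNat - k - 1) * width.toNat) := by
      have hH : height.toNat = k + 1 + (height.toNat - k - 1) := by omega
      calc height.toNat * width.toNat = (k + 1 + (height.toNat - k - 1)) * width.toNat := by rw [← hH]
        _ = k * width.toNat + (width.toNat + (height.toNat - k - 1) * width.toNat) := by ring
    rw [hsplit, pvIter_add data (k * width.toNat) _ _]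
    dsimp only
    rw [pvIter_add data width.toNat _ _]
    dsimp only
    rw [List.drop_left' (pvIter_length _ _ _), List.take_left' (pvIter_length _ _ _)]
  · -- width < 0: the inner loop body never runs and no pixel is ever emitted
    have hwn : PySem.List.pyRange 0 width 1 = [] := PySem.List.pyRange_one_eq_nil (by omega)
    have htot0 : (max 0 height * max 0 width).toNat = 0 := by
      rw [show max 0 width = 0 from by omega, Int.mul_zero]
      rfl
    rw [hwn, htot0]
    simp only [List.foldl_nil, List.map_nil, List.foldl_fixed]
    apply List.map_congr_left
    intro k _
    show ([] : List (List Int)) = _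
    simp [decode_RGBA_emit, PySem.List.slice]
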